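-- pv_equiv track=rewrite | github.com/ClemBytes/robot | integration_test.py | final_position
-- ===== SOURCE A (Python) =====
-- def final_position(moves, x_max = 4, y_max = 4):
--     """
--     Given a list of the moves, this function computes the final coordinates.
--     Important note: the list always needs to start with a 'reset' to ensure
--     replicable tests!
--
--     Args:
--         moves (list): list of moves done by the robot. Always start with
--             'reset', and can contain the following elements in any order
--             (and repeated as many times as you want):
--             - 'reset'
--             - 'up'
--             - 'down'
--             - 'left'
--             - 'right'
--         x_max (int): Value max for x (so number of lines in the grid - 1).
--         y_max (int): Value max for y (so number of columns in the grid - 1).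
--
--     Returns:
--         x (int): robot's final x coordinate in the table.
--         y (int): robot's final y coordinate in the table.
--     """
--     if moves[0] != 'reset':
--         raise ValueError(f"moves should always start with 'reset' and not '{moves[0]}'")
--
--     x = 0
--     y = 0
--     for m in moves:
--         if m == "reset":
--             x = 0
--             y = 0
--         elif m == "up":
--             x -= 1
--             if x == -1:
--                 x = x_max
--         elif m == "down":
--             x += 1
--             if x == x_max + 1:
--                 x = 0
--         elif m == "left":
--             y -= 1
--             if y == -1:
--                 y = y_max
--         elif m == "right":
--             y += 1
--             if y == y_max + 1:
--                 y = 0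
--         else:
--             raise ValueError(f"Unknown move: {m}")
--     return x, y
-- ===== SOURCE B (Python) =====
-- def final_position(moves, x_max = 4, y_max = 4):
--     if moves[0] != 'reset':
--         raise ValueError(f"moves should always start with 'reset' and not '{moves[0]}'")
--     for m in moves:
--         if m not in ('reset', 'up', 'down', 'left', 'right'):
--             raise ValueError(f"Unknown move: {m}")
--     # Only the moves after the LAST 'reset' matter: scan backwards, stop at the
--     # first 'reset' seen, accumulating net displacements, then wrap by one modulo.
--     dx = 0
--     dy = 0
--     for m in reversed(moves):
--         if m == 'reset':
--             break
--         elif m == 'up':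
--             dx -= 1
--         elif m == 'down':
--             dx += 1
--         elif m == 'left':
--             dy -= 1
--         else:
--             dy += 1
--     return dx % (x_max + 1), dy % (y_max + 1)
-- ===== Notes on version B (the rewrite author's own statement) =====
-- stated objective: alternative
-- what changed: B first validates the moves in one pass, then scans the list BACKWARDS stopping at the first 'reset' seen (the last one in order), accumulating net displacements, and wraps once with a final modulo, instead of A's forward stateful simulation with four per-step wrap-check branches.
-- outside the precondition, e.g. on final_position(['reset', 'up'], -3, 4): A returns (-3, 0), B returns (-1, 0); on final_position(['reset', 'up'], -1, 4): A returns (-1, 0), B raises ZeroDivisionError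
import Mathlib
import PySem

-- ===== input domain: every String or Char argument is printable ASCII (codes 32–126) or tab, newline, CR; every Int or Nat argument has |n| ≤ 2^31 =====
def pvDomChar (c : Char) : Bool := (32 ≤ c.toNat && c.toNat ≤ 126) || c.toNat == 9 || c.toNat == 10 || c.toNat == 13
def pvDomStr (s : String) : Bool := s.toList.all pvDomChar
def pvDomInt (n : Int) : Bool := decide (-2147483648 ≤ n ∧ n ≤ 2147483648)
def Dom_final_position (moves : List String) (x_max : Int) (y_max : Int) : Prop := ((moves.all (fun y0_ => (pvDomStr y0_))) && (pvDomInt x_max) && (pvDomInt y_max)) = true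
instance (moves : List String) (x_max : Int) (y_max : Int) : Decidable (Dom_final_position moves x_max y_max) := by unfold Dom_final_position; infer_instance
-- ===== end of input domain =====

-- B validates in one pass, then scans the moves BACKWARDS stopping at the last 'reset', accumulating net displacements, and wraps once with a final modulo (objective: alternative); equivalence proved on the domain stated in Pre_final_position.


-- ===== PORT A =====
-- A's for-loop over moves, state (x, y), per-step wrap checks; the trailing
-- (x, y) in the last branch is where Python raises ValueError (excluded by Pre_).
def fpLoopA : List String → Int → Int → Int → Int → Int × Int
  | [], _, _, x, y => (x, y)
  | m :: rest, xm, ym, x, y =>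
    if m = "reset" then fpLoopA rest xm ym 0 0
    else if m = "up" then fpLoopA rest xm ym (if x - 1 = -1 then xm else x - 1) y
    else if m = "down" then fpLoopA rest xm ym (if x + 1 = xm + 1 then 0 else x + 1) y
    else if m = "left" then fpLoopA rest xm ym x (if y - 1 = -1 then ym else y - 1)
    else if m = "right" then fpLoopA rest xm ym x (if y + 1 = ym + 1 then 0 else y + 1)
    else (x, y)

def final_position (moves : List String) (x_max : Int) (y_max : Int) : Int × Int :=
  -- moves[0] != 'reset' → ValueError (and IndexError on []); both excluded by Pre_
  if moves.head? ≠ some "reset" then (0, 0)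
  else fpLoopA moves x_max y_max 0 0

-- ===== PORT B =====
-- B's validation pass: True iff every move is known (Python raises ValueError at
-- the first unknown move; that input is excluded by Pre_).
def fpKnown : List String → Bool
  | [] => true
  | m :: rest =>
    if m ∈ (["reset", "up", "down", "left", "right"] : List String) then fpKnown rest else false

-- B's backward loop over reversed(moves): stop at the first 'reset' seen (the last
-- one in the original order), accumulating net displacements.
def fpBack : List String → Int → Int → Int × Int
  | [], dx, dy => (dx, dy)
  | m :: rest, dx, dy =>
    if m = "reset" then (dx, dy)
    else if m = "up" then fpBack rest (dx - 1) dy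
    else if m = "down" then fpBack rest (dx + 1) dy
    else if m = "left" then fpBack rest dx (dy - 1)
    else fpBack rest dx (dy + 1)

def final_position_alt (moves : List String) (x_max : Int) (y_max : Int) : Int × Int :=
  if moves.head? ≠ some "reset" then (0, 0)     -- ValueError, excluded by Pre_
  else if fpKnown moves = false then (0, 0)     -- ValueError, excluded by Pre_
  else
    let p := fpBack moves.reverse 0 0
    (PySem.Int.mod p.1 (x_max + 1), PySem.Int.mod p.2 (y_max + 1))

-- ===== PRECONDITION & SPEC =====
-- Pre_ admits the inputs on which A returns AND its per-step wrapping means modular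
-- wrapping: moves starts with 'reset' and contains only known moves (otherwise A
-- raises IndexError/ValueError), and each grid bound is nonnegative — or, when it is
-- negative (outside the natural grid domain, where A's wrap checks return accidental
-- values), no move along that axis occurs and the bound is not -1 (where B's final
-- modulo would divide by zero); see the cites in claim.json for excluded examples.
def Pre_final_position (moves : List String) (x_max : Int) (y_max : Int) : Prop :=
  moves.head? = some "reset" ∧
  (∀ m ∈ moves, m ∈ (["reset", "up", "down", "left", "right"] : List String)) ∧
  (0 ≤ x_max ∨ (x_max ≠ -1 ∧ "up" ∉ moves ∧ "down" ∉ moves)) ∧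
  (0 ≤ y_max ∨ (y_max ≠ -1 ∧ "left" ∉ moves ∧ "right" ∉ moves))
instance (moves : List String) (x_max : Int) (y_max : Int) : Decidable (Pre_final_position moves x_max y_max) := by unfold Pre_final_position; infer_instance

def pvWitness_final_position : List String × Int × Int := (["reset", "right", "up", "up", "left", "down"], 4, 4)

def Spec_final_position (moves : List String) (x_max : Int) (y_max : Int) (out : Int × Int) : Prop := out = final_position_alt moves x_max y_max
instance (moves : List String) (x_max : Int) (y_max : Int) (out : Int × Int) : Decidable (Spec_final_position moves x_max y_max out) := by unfold Spec_final_position; infer_instance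

-- ===== CLAIM (what is proved, stated in full; the proofs are below) =====
def Claim_equal_final_position : Prop := ∀ (moves : List String) (x_max : Int) (y_max : Int), Dom_final_position moves x_max y_max → Pre_final_position moves x_max y_max → Spec_final_position moves x_max y_max (final_position moves x_max y_max)

-- ===== LEMMAS AND PROOFS =====

-- proof-side bridge: forward net-displacement fold (used only in the lemmas)
def fpLoopB : List String → Int → Int → Int × Int
  | [], dx, dy => (dx, dy)
  | m :: rest, dx, dy =>
    if m = "reset" then fpLoopB rest 0 0
    else if m = "up" then fpLoopB rest (dx - 1) dy
    else if m = "down" then fpLoopB rest (dx + 1) dy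
    else if m = "left" then fpLoopB rest dx (dy - 1)
    else if m = "right" then fpLoopB rest dx (dy + 1)
    else (dx, dy)

-- shifting by ±1 commutes with emod (n > 0), matching A's wrap checks
lemma emod_sub_one (n dx : Int) (hn : 0 < n) :
    (if dx % n - 1 = -1 then n - 1 else dx % n - 1) = (dx - 1) % n := by
  have h1 : 0 ≤ dx % n := Int.emod_nonneg dx (ne_of_gt hn)
  have h2 : dx % n < n := Int.emod_lt_of_pos dx hn
  have key : (dx - 1) % n = (dx % n - 1) % n := by
    conv_lhs => rw [← Int.emod_add_mul_ediv dx n]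
    rw [show dx % n + n * (dx / n) - 1 = dx % n - 1 + n * (dx / n) by ring,
      Int.add_mul_emod_self_left]
  rw [key]
  split_ifs with h
  · rw [h, show (-1 : Int) = (n - 1) + n * (-1) by ring, Int.add_mul_emod_self_left]
    exact (Int.emod_eq_of_lt (by omega) (by omega)).symm
  · exact (Int.emod_eq_of_lt (by omega) (by omega)).symm

lemma emod_add_one (n dx : Int) (hn : 0 < n) :
    (if dx % n + 1 = n then 0 else dx % n + 1) = (dx + 1) % n := by
  have h1 : 0 ≤ dx % n := Int.emod_nonneg dx (ne_of_gt hn)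
  have h2 : dx % n < n := Int.emod_lt_of_pos dx hn
  have key : (dx + 1) % n = (dx % n + 1) % n := by
    conv_lhs => rw [← Int.emod_add_mul_ediv dx n]
    rw [show dx % n + n * (dx / n) + 1 = dx % n + 1 + n * (dx / n) by ring,
      Int.add_mul_emod_self_left]
  rw [key]
  split_ifs with h
  · rw [h, Int.emod_self]
  · exact (Int.emod_eq_of_lt (by omega) (by omega)).symm

-- loop invariant: A's wrapped state is the raw net state reduced mod the grid sizes
-- (along an axis with a negative bound, no move touches that axis)
lemma loop_eq (xm ym : Int) :
    ∀ (rest : List String),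
      (∀ m ∈ rest, m ∈ (["reset", "up", "down", "left", "right"] : List String)) →
      (0 ≤ xm ∨ (xm ≠ -1 ∧ "up" ∉ rest ∧ "down" ∉ rest)) →
      (0 ≤ ym ∨ (ym ≠ -1 ∧ "left" ∉ rest ∧ "right" ∉ rest)) →
      ∀ dx dy,
        fpLoopA rest xm ym (PySem.Int.mod dx (xm + 1)) (PySem.Int.mod dy (ym + 1)) =
          (PySem.Int.mod (fpLoopB rest dx dy).1 (xm + 1),
           PySem.Int.mod (fpLoopB rest dx dy).2 (ym + 1)) := by
  intro rest
  induction rest with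
  | nil => intro _ _ _ dx dy; rfl
  | cons m rest ih =>
    intro hmem hCx hCy dx dy
    have hm : m ∈ (["reset", "up", "down", "left", "right"] : List String) :=
      hmem m (List.mem_cons_self ..)
    have hrest : ∀ m' ∈ rest, m' ∈ (["reset", "up", "down", "left", "right"] : List String) :=
      fun m' h => hmem m' (List.mem_cons_of_mem _ h)
    have hCx' : 0 ≤ xm ∨ (xm ≠ -1 ∧ "up" ∉ rest ∧ "down" ∉ rest) := by
      rcases hCx with h | h
      · exact Or.inl h
      · exact Or.inr ⟨h.1, fun hc => h.2.1 (List.mem_cons_of_mem _ hc),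
          fun hc => h.2.2 (List.mem_cons_of_mem _ hc)⟩
    have hCy' : 0 ≤ ym ∨ (ym ≠ -1 ∧ "left" ∉ rest ∧ "right" ∉ rest) := by
      rcases hCy with h | h
      · exact Or.inl h
      · exact Or.inr ⟨h.1, fun hc => h.2.1 (List.mem_cons_of_mem _ hc),
          fun hc => h.2.2 (List.mem_cons_of_mem _ hc)⟩
    have h0x : PySem.Int.mod 0 (xm + 1) = 0 := by simp [PySem.Int.mod]
    have h0y : PySem.Int.mod 0 (ym + 1) = 0 := by simp [PySem.Int.mod]
    simp only [List.mem_cons, List.not_mem_nil, or_false] at hm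
    rcases hm with h | h | h | h | h <;> subst h <;>
      simp only [fpLoopA, fpLoopB, String.reduceEq, reduceIte]
    · -- reset
      have := ih hrest hCx' hCy' 0 0
      rw [h0x, h0y] at this
      exact this
    · -- up
      rcases hCx with hxnn | hno
      · have hxp : (0 : Int) < xm + 1 := by omega
        have h' : (if PySem.Int.mod dx (xm + 1) - 1 = -1 then xm
              else PySem.Int.mod dx (xm + 1) - 1) = PySem.Int.mod (dx - 1) (xm + 1) := by
          rw [PySem.Int.mod_eq_emod_of_pos hxp, PySem.Int.mod_eq_emod_of_pos hxp,
            ← emod_sub_one (xm + 1) dx hxp]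
          norm_num
        rw [h']
        exact ih hrest hCx' hCy' (dx - 1) dy
      · exact absurd (List.mem_cons_self ..) hno.2.1
    · -- down
      rcases hCx with hxnn | hno
      · have hxp : (0 : Int) < xm + 1 := by omega
        have h' : (if PySem.Int.mod dx (xm + 1) + 1 = xm + 1 then 0
              else PySem.Int.mod dx (xm + 1) + 1) = PySem.Int.mod (dx + 1) (xm + 1) := by
          rw [PySem.Int.mod_eq_emod_of_pos hxp, PySem.Int.mod_eq_emod_of_pos hxp,
            ← emod_add_one (xm + 1) dx hxp]
        rw [h']
        exact ih hrest hCx' hCy' (dx + 1) dy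
      · exact absurd (List.mem_cons_self ..) hno.2.2
    · -- left
      rcases hCy with hynn | hno
      · have hyp : (0 : Int) < ym + 1 := by omega
        have h' : (if PySem.Int.mod dy (ym + 1) - 1 = -1 then ym
              else PySem.Int.mod dy (ym + 1) - 1) = PySem.Int.mod (dy - 1) (ym + 1) := by
          rw [PySem.Int.mod_eq_emod_of_pos hyp, PySem.Int.mod_eq_emod_of_pos hyp,
            ← emod_sub_one (ym + 1) dy hyp]
          norm_num
        rw [h']
        exact ih hrest hCx' hCy' dx (dy - 1)
      · exact absurd (List.mem_cons_self ..) hno.2.1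
    · -- right
      rcases hCy with hynn | hno
      · have hyp : (0 : Int) < ym + 1 := by omega
        have h' : (if PySem.Int.mod dy (ym + 1) + 1 = ym + 1 then 0
              else PySem.Int.mod dy (ym + 1) + 1) = PySem.Int.mod (dy + 1) (ym + 1) := by
          rw [PySem.Int.mod_eq_emod_of_pos hyp, PySem.Int.mod_eq_emod_of_pos hyp,
            ← emod_add_one (ym + 1) dy hyp]
        rw [h']
        exact ih hrest hCx' hCy' dx (dy + 1)
      · exact absurd (List.mem_cons_self ..) hno.2.2

-- fpKnown is the Boolean form of the membership condition in Pre_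
lemma fpKnown_of_mem :
    ∀ (l : List String),
      (∀ m ∈ l, m ∈ (["reset", "up", "down", "left", "right"] : List String)) →
      fpKnown l = true := by
  intro l
  induction l with
  | nil => intro _; rfl
  | cons m rest ih =>
    intro h
    simp only [fpKnown, if_pos (h m (List.mem_cons_self ..))]
    exact ih fun m' hm' => h m' (List.mem_cons_of_mem _ hm')

-- once a 'reset' lies ahead, the forward fold's accumulator is irrelevant
lemma fpLoopB_indep :
    ∀ (l : List String),
      (∀ m ∈ l, m ∈ (["reset", "up", "down", "left", "right"] : List String)) →
      "reset" ∈ l → ∀ a b, fpLoopB l a b = fpLoopB l 0 0 := by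
  intro l
  induction l with
  | nil => intro _ h; exact absurd h (List.not_mem_nil)
  | cons m rest ih =>
    intro hmem hr a b
    have hm : m ∈ (["reset", "up", "down", "left", "right"] : List String) :=
      hmem m (List.mem_cons_self ..)
    have hrest : ∀ m' ∈ rest, m' ∈ (["reset", "up", "down", "left", "right"] : List String) :=
      fun m' h => hmem m' (List.mem_cons_of_mem _ h)
    by_cases hmr : m = "reset"
    · subst hmr; simp [fpLoopB]
    · have hr' : "reset" ∈ rest := by
        rcases List.mem_cons.mp hr with h | h
        · exact absurd h.symm hmr
        · exact h
      simp only [List.mem_cons, List.not_mem_nil, or_false] at hm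
      rcases hm with h | h | h | h | h
      · exact absurd h hmr
      all_goals subst h
      all_goals simp only [fpLoopB, String.reduceEq, reduceIte]
      · rw [ih hrest hr' (a - 1) b, ih hrest hr' (0 - 1) 0]
      · rw [ih hrest hr' (a + 1) b, ih hrest hr' (0 + 1) 0]
      · rw [ih hrest hr' a (b - 1), ih hrest hr' 0 (0 - 1)]
      · rw [ih hrest hr' a (b + 1), ih hrest hr' 0 (0 + 1)]

-- without a 'reset' ahead, the forward fold just shifts by the accumulator
lemma fpLoopB_shift :
    ∀ (l : List String),
      (∀ m ∈ l, m ∈ (["reset", "up", "down", "left", "right"] : List String)) →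
      "reset" ∉ l → ∀ a b,
      fpLoopB l a b = ((fpLoopB l 0 0).1 + a, (fpLoopB l 0 0).2 + b) := by
  intro l
  induction l with
  | nil => intro _ _ a b; simp [fpLoopB]
  | cons m rest ih =>
    intro hmem hr a b
    have hm : m ∈ (["reset", "up", "down", "left", "right"] : List String) :=
      hmem m (List.mem_cons_self ..)
    have hrest : ∀ m' ∈ rest, m' ∈ (["reset", "up", "down", "left", "right"] : List String) :=
      fun m' h => hmem m' (List.mem_cons_of_mem _ h)
    have hmr : m ≠ "reset" := fun h => hr (by simp [h])
    have hr' : "reset" ∉ rest := fun h => hr (List.mem_cons_of_mem _ h)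
    simp only [List.mem_cons, List.not_mem_nil, or_false] at hm
    rcases hm with h | h | h | h | h
    · exact absurd h hmr
    all_goals subst h
    all_goals simp only [fpLoopB, String.reduceEq, reduceIte]
    · rw [ih hrest hr' (a - 1) b, ih hrest hr' (0 - 1) 0]
      simp only [Prod.mk.injEq]; constructor <;> ring
    · rw [ih hrest hr' (a + 1) b, ih hrest hr' (0 + 1) 0]
      simp only [Prod.mk.injEq]; constructor <;> ring
    · rw [ih hrest hr' a (b - 1), ih hrest hr' 0 (0 - 1)]
      simp only [Prod.mk.injEq]; constructor <;> ring
    · rw [ih hrest hr' a (b + 1), ih hrest hr' 0 (0 + 1)]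
      simp only [Prod.mk.injEq]; constructor <;> ring

-- the backward loop distributes over append when the first part has no 'reset'
lemma fpBack_append :
    ∀ (u v : List String) (a b : Int), "reset" ∉ u →
      fpBack (u ++ v) a b = fpBack v (fpBack u a b).1 (fpBack u a b).2 := by
  intro u
  induction u with
  | nil => intro v a b _; rfl
  | cons m rest ih =>
    intro v a b hr
    have hmr : m ≠ "reset" := fun h => hr (by simp [h])
    have hr' : "reset" ∉ rest := fun h => hr (List.mem_cons_of_mem _ h)
    simp only [List.cons_append, fpBack, if_neg hmr]
    split_ifs <;> rw [ih _ _ _ hr']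

-- when 'reset' occurs in u, the backward loop never leaves u
lemma fpBack_append_stop :
    ∀ (u v : List String) (a b : Int), "reset" ∈ u →
      fpBack (u ++ v) a b = fpBack u a b := by
  intro u
  induction u with
  | nil => intro v a b h; exact absurd h (List.not_mem_nil)
  | cons m rest ih =>
    intro v a b hr
    by_cases hmr : m = "reset"
    · subst hmr; simp [fpBack]
    · have hr' : "reset" ∈ rest := by
        rcases List.mem_cons.mp hr with h | h
        · exact absurd h.symm hmr
        · exact h
      simp only [List.cons_append, fpBack, if_neg hmr]
      split_ifs <;> exact ih _ _ _ hr'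

-- the backward scan equals the forward net-displacement fold (shifted by the accumulator)
lemma back_eq :
    ∀ (l : List String),
      (∀ m ∈ l, m ∈ (["reset", "up", "down", "left", "right"] : List String)) →
      ∀ a b, fpBack l.reverse a b = ((fpLoopB l 0 0).1 + a, (fpLoopB l 0 0).2 + b) := by
  intro l
  induction l with
  | nil => intro _ a b; simp [fpBack, fpLoopB]
  | cons m rest ih =>
    intro hmem a b
    have hm : m ∈ (["reset", "up", "down", "left", "right"] : List String) :=
      hmem m (List.mem_cons_self ..)
    have hrest : ∀ m' ∈ rest, m' ∈ (["reset", "up", "down", "left", "right"] : List String) :=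
      fun m' h => hmem m' (List.mem_cons_of_mem _ h)
    rw [List.reverse_cons]
    by_cases hr : "reset" ∈ rest
    · rw [fpBack_append_stop rest.reverse [m] a b (by simpa using hr)]
      have hA : fpLoopB (m :: rest) 0 0 = fpLoopB rest 0 0 := by
        simp only [List.mem_cons, List.not_mem_nil, or_false] at hm
        rcases hm with h | h | h | h | h <;> subst h <;>
          simp only [fpLoopB, String.reduceEq, reduceIte] <;>
          rw [fpLoopB_indep rest hrest hr]
      rw [hA, ih hrest a b]
    · rw [fpBack_append rest.reverse [m] a b (by simpa using hr)]
      rw [ih hrest a b]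
      simp only [List.mem_cons, List.not_mem_nil, or_false] at hm
      rcases hm with h | h | h | h | h <;> subst h <;>
        simp only [fpBack, fpLoopB, String.reduceEq, reduceIte]
      · rw [fpLoopB_shift rest hrest hr (0 - 1) 0]
        simp only [Prod.mk.injEq]; constructor <;> ring
      · rw [fpLoopB_shift rest hrest hr (0 + 1) 0]
        simp only [Prod.mk.injEq]; constructor <;> ring
      · rw [fpLoopB_shift rest hrest hr 0 (0 - 1)]
        simp only [Prod.mk.injEq]; constructor <;> ring
      · rw [fpLoopB_shift rest hrest hr 0 (0 + 1)]
        simp only [Prod.mk.injEq]; constructor <;> ring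

-- ===== VERDICT (by name: the statement is the Claim_ definition above) =====
theorem final_position_spec : Claim_equal_final_position := by
  intro moves x_max y_max _ hpre
  obtain ⟨hhead, hmem, hCx, hCy⟩ := hpre
  unfold Spec_final_position final_position final_position_alt
  rw [if_neg (by simp [hhead]), if_neg (by simp [hhead]),
    if_neg (by simp [fpKnown_of_mem moves hmem])]
  have h0x : PySem.Int.mod 0 (x_max + 1) = 0 := by simp [PySem.Int.mod]
  have h0y : PySem.Int.mod 0 (y_max + 1) = 0 := by simp [PySem.Int.mod]
  have hA := loop_eq x_max y_max moves hmem hCx hCy 0 0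
  rw [h0x, h0y] at hA
  rw [hA]
  have hB := back_eq moves hmem 0 0
  simp only [add_zero] at hB
  rw [hB]
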